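-- pv_equiv track=rewrite | github.com/andrewhamara/leetcode | py/1790.py | areAlmostEqual
-- ===== SOURCE A (Python) =====
-- def areAlmostEqual(s1:str, s2:str) -> bool:
--     if s1 == s2: return True
--     diff = 0
--     i = 0
--     if sorted(s1) != sorted(s2): return False
--
--     length = len(s1)
--     if length == 2 and s1 != s2: return False
--
--     while length > i and diff < 2:
--         if s1[i] != s2[i]:
--             s1 = s1[:i] + s2[i] + s1[i+1:]
--             diff += 1
--         i += 1
--
--     return s1 == s2
-- ===== SOURCE B (Python) =====
-- def areAlmostEqual(s1: str, s2: str) -> bool: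
--     if len(s1) != len(s2):
--         return False
--     diffs = [(a, b) for a, b in zip(s1, s2) if a != b]
--     if not diffs:
--         return True
--     if len(diffs) != 2:
--         return False
--     (a, b), (c, d) = diffs
--     return a == d and b == c
-- ===== Notes on version B (the rewrite author's own statement) =====
-- stated objective: simpler
-- what changed: B replaces A's two sorted() calls and its string-splicing repair loop by a single pass that collects the mismatched character pairs and checks there are exactly zero or two of them forming a swap.
-- intended difference: On length-2 strings that are a genuine one-swap pair (s2 is s1 reversed with two distinct characters, e.g. ('ab','ba')) A's special guard 'length == 2 and s1 != s2' returns False, while B returns True, which is the intended answer since one swap makes them equal. — e.g. on areAlmostEqual("ab", "ba"): A returns false, B returns true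
import Mathlib
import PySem

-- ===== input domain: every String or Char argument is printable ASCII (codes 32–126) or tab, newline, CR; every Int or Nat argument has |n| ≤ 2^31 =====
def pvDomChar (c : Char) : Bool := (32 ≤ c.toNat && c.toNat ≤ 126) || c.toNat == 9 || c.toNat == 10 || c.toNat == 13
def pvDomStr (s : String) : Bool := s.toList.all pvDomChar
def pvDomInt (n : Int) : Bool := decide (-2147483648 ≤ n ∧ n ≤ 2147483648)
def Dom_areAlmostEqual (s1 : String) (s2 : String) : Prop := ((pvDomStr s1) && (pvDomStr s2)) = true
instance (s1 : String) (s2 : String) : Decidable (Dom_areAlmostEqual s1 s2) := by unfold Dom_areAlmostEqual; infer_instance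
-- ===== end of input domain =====

-- B is simpler: a single pass collecting the mismatched character pairs instead of A's sorted()
-- comparison plus splice-and-retest loop; on length-2 one-swap pairs A returns the wrong value
-- (see D_ below) and B returns the intended one.

-- ===== PORT A =====
-- the while loop: `n` is the fixed Python variable `length` = len(s1); s1 is carried as a list of
-- chars, rebuilt on a mismatch exactly as `s1[:i] + s2[i] + s1[i+1:]`; indexing is total here
-- because the loop only runs with i < length and (after the sorted() check) len(s2) = len(s1)
def pvLoopA (n : Nat) (l1 l2 : List Char) (i diff : Nat) : Bool :=
  if _h : i < n ∧ diff < 2 then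
    if l1.getD i ' ' ≠ l2.getD i ' ' then
      pvLoopA n (l1.take i ++ [l2.getD i ' '] ++ l1.drop (i + 1)) l2 (i + 1) (diff + 1)
    else
      pvLoopA n l1 l2 (i + 1) diff
  else
    decide (l1 = l2)
termination_by n - i

def areAlmostEqual (s1 : String) (s2 : String) : Bool :=
  if s1 == s2 then true
  else if PySem.List.sorted s1.toList (fun c => c) false ≠ PySem.List.sorted s2.toList (fun c => c) false then false
  else
    let length := s1.toList.length
    if length == 2 && s1 ≠ s2 then false
    else pvLoopA length s1.toList s2.toList 0 0

-- ===== PORT B =====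
-- diffs = [(a, b) for a, b in zip(s1, s2) if a != b]
def pvDiffsB (l1 l2 : List Char) : List (Char × Char) :=
  (l1.zip l2).filter (fun p => p.1 ≠ p.2)

def areAlmostEqual_alt (s1 : String) (s2 : String) : Bool :=
  if s1.toList.length ≠ s2.toList.length then false
  else
    let diffs := pvDiffsB s1.toList s2.toList
    if diffs.isEmpty then true
    else if diffs.length ≠ 2 then false
    else match diffs with
      | (a, b) :: (c, d) :: _ => a == d && b == c
      | _ => false

-- ===== PRECONDITION & SPEC =====
-- On length-2 strings where s2 is s1 reversed and s1 ≠ s2 (a genuine one-swap pair like "ab"/"ba"),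
-- A's guard 'length == 2 and s1 != s2' returns False, B returns True, the intended answer.
def D_areAlmostEqual (s1 : String) (s2 : String) : Prop :=
  s1.toList.length = 2 ∧ s2.toList = s1.toList.reverse ∧ s1 ≠ s2
instance (s1 : String) (s2 : String) : Decidable (D_areAlmostEqual s1 s2) := by
  unfold D_areAlmostEqual; infer_instance

def Spec_areAlmostEqual (s1 : String) (s2 : String) (out : Bool) : Prop :=
  ¬ D_areAlmostEqual s1 s2 → out = areAlmostEqual_alt s1 s2
instance (s1 : String) (s2 : String) (out : Bool) : Decidable (Spec_areAlmostEqual s1 s2 out) := by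
  unfold Spec_areAlmostEqual; infer_instance

def pvDiffWitness_areAlmostEqual : String × String := ("ab", "ba")
def pvDiffWitnessOut_areAlmostEqual : Bool × Bool := (false, true)

-- ===== CLAIM (what is proved, stated in full; the proofs are below) =====
def Claim_unchanged_areAlmostEqual : Prop := ∀ (s1 : String) (s2 : String), Dom_areAlmostEqual s1 s2 → Spec_areAlmostEqual s1 s2 (areAlmostEqual s1 s2)
def Claim_changed_areAlmostEqual : Prop := Dom_areAlmostEqual (pvDiffWitness_areAlmostEqual.1) (pvDiffWitness_areAlmostEqual.2) ∧ D_areAlmostEqual (pvDiffWitness_areAlmostEqual.1) (pvDiffWitness_areAlmostEqual.2) ∧ areAlmostEqual (pvDiffWitness_areAlmostEqual.1) (pvDiffWitness_areAlmostEqual.2) = pvDiffWitnessOut_areAlmostEqual.1 ∧ areAlmostEqual_alt (pvDiffWitness_areAlmostEqual.1) (pvDiffWitness_areAlmostEqual.2) = pvDiffWitnessOut_areAlmostEqual.2 ∧ pvDiffWitnessOut_areAlmostEqual.1 ≠ pvDiffWitnessOut_areAlmostEqual.2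
def Claim_exact_areAlmostEqual : Prop := ∀ (s1 : String) (s2 : String), Dom_areAlmostEqual s1 s2 → D_areAlmostEqual s1 s2 → areAlmostEqual s1 s2 ≠ areAlmostEqual_alt s1 s2

-- ===== LEMMAS AND PROOFS =====

theorem pvDiffsB_nil_iff (l1 l2 : List Char) (h : l1.length = l2.length) :
    pvDiffsB l1 l2 = [] ↔ l1 = l2 := by
  induction l1 generalizing l2 with
  | nil => cases l2 with
    | nil => simp [pvDiffsB]
    | cons b t2 => simp at h
  | cons a t1 ih => cases l2 with
    | nil => simp at h
    | cons b t2 =>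
      simp only [List.length_cons, Nat.add_right_cancel_iff] at h
      by_cases hab : a = b
      · subst hab
        simpa [pvDiffsB] using ih t2 h
      · simp [pvDiffsB, List.zip_cons_cons, hab]

theorem pvDiffsB_append_perm (l1 l2 : List Char) (h : l1.length = l2.length) :
    (l1 ++ (pvDiffsB l1 l2).map Prod.snd).Perm (l2 ++ (pvDiffsB l1 l2).map Prod.fst) := by
  induction l1 generalizing l2 with
  | nil => cases l2 with
    | nil => simp [pvDiffsB]
    | cons b t2 => simp at h
  | cons a t1 ih => cases l2 with
    | nil => simp at h
    | cons b t2 =>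
      simp only [List.length_cons, Nat.add_right_cancel_iff] at h
      by_cases hab : a = b
      · subst hab
        simpa [pvDiffsB, List.zip_cons_cons, List.filter_cons] using (ih t2 h).cons a
      · simp only [pvDiffsB, List.zip_cons_cons, List.filter_cons] at *
        simp only [ne_eq, hab, not_false_iff, decide_true, decide_not, List.map_cons,
          List.cons_append, if_pos] at *
        have hmid1 : (t1 ++ b :: (((t1.zip t2).filter (fun p => !decide (p.1 = p.2))).map Prod.snd)).Perm
            (b :: (t1 ++ ((t1.zip t2).filter (fun p => !decide (p.1 = p.2))).map Prod.snd)) :=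
          List.perm_middle
        have hmid2 : (t2 ++ a :: (((t1.zip t2).filter (fun p => !decide (p.1 = p.2))).map Prod.fst)).Perm
            (a :: (t2 ++ ((t1.zip t2).filter (fun p => !decide (p.1 = p.2))).map Prod.fst)) :=
          List.perm_middle
        refine ((hmid1.cons a).trans ?_).trans ((hmid2.cons b).symm)
        refine (List.Perm.swap b a _).trans ?_
        exact ((ih t2 h).cons a).cons b

theorem pvDiffsB_map_perm (l1 l2 : List Char) (h : l1.length = l2.length) (hp : l1.Perm l2) :
    ((pvDiffsB l1 l2).map Prod.snd).Perm ((pvDiffsB l1 l2).map Prod.fst) :=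
  (List.perm_append_left_iff l2).mp ((hp.symm.append_right _).trans (pvDiffsB_append_perm l1 l2 h))

theorem pvMemDiffsB_ne (l1 l2 : List Char) (p : Char × Char) (hp : p ∈ pvDiffsB l1 l2) :
    p.1 ≠ p.2 := by
  have := List.of_mem_filter hp
  simpa using this

theorem pvPermPair (a b c d : Char) (h : [a, b].Perm [c, d]) :
    a = c ∧ b = d ∨ a = d ∧ b = c := by
  have ha : a ∈ [c, d] := h.mem_iff.mp (by simp)
  simp at ha
  rcases ha with rfl | rfl
  · exact Or.inl ⟨rfl, by simpa using h.cons_inv⟩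
  · refine Or.inr ⟨rfl, ?_⟩
    have h2 : [a, b].Perm [a, c] := h.trans (List.Perm.swap a c [])
    simpa using h2.cons_inv

-- under multiset equality, exactly two mismatched pairs must form a swap
theorem pvTwoDiffsSwap (l1 l2 : List Char) (h : l1.length = l2.length) (hp : l1.Perm l2)
    (a b c d : Char) (hd : pvDiffsB l1 l2 = [(a, b), (c, d)]) : a = d ∧ b = c := by
  have hmp := pvDiffsB_map_perm l1 l2 h hp
  rw [hd] at hmp
  simp only [List.map_cons, List.map_nil] at hmp
  have hab : a ≠ b := pvMemDiffsB_ne l1 l2 (a, b) (by rw [hd]; simp)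
  have hcd : c ≠ d := pvMemDiffsB_ne l1 l2 (c, d) (by rw [hd]; simp)
  rcases pvPermPair b d a c hmp with ⟨h1, h2⟩ | ⟨h1, h2⟩
  · exact absurd h1.symm hab
  · exact ⟨h2.symm, h1⟩

-- one mismatched pair is impossible under multiset equality
theorem pvOneDiffAbsurd (l1 l2 : List Char) (h : l1.length = l2.length) (hp : l1.Perm l2)
    (a b : Char) (hd : pvDiffsB l1 l2 = [(a, b)]) : False := by
  have hmp := pvDiffsB_map_perm l1 l2 h hp
  rw [hd] at hmp
  simp only [List.map_cons, List.map_nil] at hmp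
  have hab : a ≠ b := pvMemDiffsB_ne l1 l2 (a, b) (by rw [hd]; simp)
  have hba : b = a := by
    have := List.perm_singleton.mp hmp
    injection this
  exact hab hba.symm

theorem pvLoopA_spec (n : Nat) : ∀ (i diff : Nat) (l1 l2 : List Char),
    l1.length = n → l2.length = n → i ≤ n → diff ≤ 2 → l1.take i = l2.take i →
    pvLoopA n l1 l2 i diff
      = decide (diff + (pvDiffsB (l1.drop i) (l2.drop i)).length ≤ 2
          ∨ (pvDiffsB (l1.drop i) (l2.drop i)).length = 0) := by
  intro i diff l1 l2 h1 h2 hi hd ht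
  induction hk : n - i using Nat.strong_induction_on generalizing i diff l1 l2 with
  | _ k ih =>
  rw [pvLoopA]
  by_cases hcond : i < n ∧ diff < 2
  · rw [dif_pos hcond]
    have hi1 : i < l1.length := by omega
    have hi2 : i < l2.length := by omega
    have hg1 : l1.getD i ' ' = l1[i] := List.getD_eq_getElem _ _ hi1
    have hg2 : l2.getD i ' ' = l2[i] := List.getD_eq_getElem _ _ hi2
    have hdrop1 : l1.drop i = l1[i] :: l1.drop (i+1) := List.drop_eq_getElem_cons hi1
    have hdrop2 : l2.drop i = l2[i] :: l2.drop (i+1) := List.drop_eq_getElem_cons hi2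
    have htake1 : l1.take (i+1) = l1.take i ++ [l1[i]] := by
      rw [List.take_add_one]; simp [List.getElem?_eq_getElem hi1]
    have htake2 : l2.take (i+1) = l2.take i ++ [l2[i]] := by
      rw [List.take_add_one]; simp [List.getElem?_eq_getElem hi2]
    by_cases hne : l1[i] = l2[i]
    · rw [if_neg (by rw [hg1, hg2]; simp [hne])]
      rw [ih (n - (i+1)) (by omega) (i+1) diff l1 l2 h1 h2 (by omega) hd
        (by rw [htake1, htake2, ht, hne]) rfl]
      have hdd : pvDiffsB (l1.drop i) (l2.drop i)
          = pvDiffsB (l1.drop (i+1)) (l2.drop (i+1)) := by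
        rw [hdrop1, hdrop2]
        simp only [pvDiffsB, List.zip_cons_cons, List.filter_cons, hne]
        rw [if_neg (by simp)]
      rw [hdd]
    · rw [if_pos (by rw [hg1, hg2]; exact hne)]
      set x := l2.getD i ' ' with hx
      set l1' := l1.take i ++ [x] ++ l1.drop (i + 1) with hl1'
      have hlen' : l1'.length = n := by
        simp [hl1', List.length_take, List.length_drop]; omega
      have htklen : (l1.take i ++ [x]).length = i + 1 := by
        simp [List.length_take]; omega
      have htk' : l1'.take (i+1) = l1.take i ++ [x] := by
        rw [hl1', List.append_assoc, ← List.singleton_append, ← List.append_assoc]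
        exact List.take_left' htklen
      have hdr' : l1'.drop (i+1) = l1.drop (i+1) := by
        rw [hl1', List.append_assoc, ← List.singleton_append, ← List.append_assoc]
        exact List.drop_left' htklen
      rw [ih (n - (i+1)) (by omega) (i+1) (diff+1) l1' l2 hlen' h2 (by omega) (by omega)
        (by rw [htk', htake2, ht, hg2]) rfl]
      rw [hdr']
      have hdd : pvDiffsB (l1.drop i) (l2.drop i)
          = (l1[i], l2[i]) :: pvDiffsB (l1.drop (i+1)) (l2.drop (i+1)) := by
        rw [hdrop1, hdrop2]
        simp only [pvDiffsB, List.zip_cons_cons, List.filter_cons]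
        rw [if_pos (by simp [hne])]
      rw [hdd]
      simp only [List.length_cons, decide_eq_decide]
      omega
  · rw [dif_neg hcond]
    have heq : (l1 = l2) ↔ l1.drop i = l2.drop i := by
      constructor
      · intro h; rw [h]
      · intro h
        rw [← List.take_append_drop i l1, ← List.take_append_drop i l2, ht, h]
    by_cases hin : i < n
    · have hdiff : diff = 2 := by omega
      subst hdiff
      have hnil := pvDiffsB_nil_iff (l1.drop i) (l2.drop i) (by simp [h1, h2])
      simp only [decide_eq_decide]
      rw [heq, ← hnil]
      constructor
      · intro h; right; rw [h]; rfl
      · rintro (h | h) <;> exact List.length_eq_zero_iff.mp (by omega)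
    · have hieq : i = n := by omega
      subst hieq
      have hd1 : l1.drop i = [] := by rw [List.drop_eq_nil_iff]; omega
      have hd2 : l2.drop i = [] := by rw [List.drop_eq_nil_iff]; omega
      rw [hd1, hd2]
      simp only [pvDiffsB, List.zip_nil_left, List.filter_nil, List.length_nil]
      simp [heq, hd1, hd2]

-- B's value once the lengths agree, by the shape of the mismatch list
theorem pvAltB_cases (s1 s2 : String) (hlen : s1.toList.length = s2.toList.length) :
    areAlmostEqual_alt s1 s2
      = (match pvDiffsB s1.toList s2.toList with
          | [] => true
          | [(a, b), (c, d)] => a == d && b == c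
          | _ => false) := by
  simp only [areAlmostEqual_alt]
  rw [if_neg (by simp [hlen])]
  generalize pvDiffsB s1.toList s2.toList = d
  rcases d with _ | ⟨⟨a, b⟩, _ | ⟨⟨c, e⟩, _ | ⟨p, t⟩⟩⟩ <;> simp

-- A's value in the branch that reaches the while loop
theorem pvA_loop_value (s1 s2 : String) (hlen : s1.toList.length = s2.toList.length) :
    pvLoopA s1.toList.length s1.toList s2.toList 0 0
      = decide ((pvDiffsB s1.toList s2.toList).length ≤ 2) := by
  rw [pvLoopA_spec s1.toList.length 0 0 s1.toList s2.toList rfl hlen.symm (by omega) (by omega) rfl]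
  simp only [List.drop_zero, decide_eq_decide]
  omega

-- a length-2 permutation that is not equality is the reversal
theorem pvLenTwoPermRev (l1 l2 : List Char) (hp : l1.Perm l2) (h2 : l1.length = 2)
    (hne : l1 ≠ l2) : l2 = l1.reverse := by
  obtain ⟨a, b, hab⟩ := List.length_eq_two.mp h2
  have hlen2 : l2.length = 2 := hp.length_eq ▸ h2
  obtain ⟨c, d, hcd⟩ := List.length_eq_two.mp hlen2
  subst hab; subst hcd
  rcases pvPermPair a b c d hp with ⟨rfl, rfl⟩ | ⟨rfl, rfl⟩
  · exact absurd rfl hne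
  · simp

-- ===== VERDICT (by name: the statement is the Claim_ definition above) =====
theorem areAlmostEqual_spec : Claim_unchanged_areAlmostEqual := by
  intro s1 s2 _
  unfold Spec_areAlmostEqual
  intro hnd
  by_cases hs : s1.toList = s2.toList
  · have hss : s1 = s2 := String.toList_inj.mp hs
    subst hss
    have hnil : pvDiffsB s1.toList s1.toList = [] := (pvDiffsB_nil_iff _ _ rfl).mpr rfl
    rw [pvAltB_cases s1 s1 rfl, hnil]
    simp [areAlmostEqual]
  · have hneq : s1 ≠ s2 := fun h => hs (congrArg _ h)
    by_cases hp : s1.toList.Perm s2.toList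
    · have hlen : s1.toList.length = s2.toList.length := hp.length_eq
      have hsorted : PySem.List.sorted s1.toList (fun c => c) false
          = PySem.List.sorted s2.toList (fun c => c) false :=
        PySem.List.sorted_eq_sorted_of_perm _ _ _ (fun _ _ h => h) hp
      have hc0 : pvDiffsB s1.toList s2.toList ≠ [] :=
        fun h => hs ((pvDiffsB_nil_iff _ _ hlen).mp h)
      have hn2 : s1.toList.length ≠ 2 := by
        intro h2
        exact hnd ⟨h2, pvLenTwoPermRev _ _ hp h2 hs, hneq⟩
      have hA : areAlmostEqual s1 s2 = decide ((pvDiffsB s1.toList s2.toList).length ≤ 2) := by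
        simp only [areAlmostEqual]
        rw [if_neg (by simpa using hneq), if_neg (by simp [hsorted])]
        rw [if_neg (by simp; intro h; exact absurd (by simpa using h) hn2), pvA_loop_value s1 s2 hlen]
      rw [hA, pvAltB_cases s1 s2 hlen]
      rcases hd : pvDiffsB s1.toList s2.toList with _ | ⟨⟨a, b⟩, _ | ⟨⟨c, e⟩, _ | ⟨p, t⟩⟩⟩
      · exact absurd hd hc0
      · exact (pvOneDiffAbsurd _ _ hlen hp a b hd).elim
      · obtain ⟨h1, h2⟩ := pvTwoDiffsSwap _ _ hlen hp a b c e hd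
        simp [h1, h2]
      · simp
    · have hsne : PySem.List.sorted s1.toList (fun c => c) false
          ≠ PySem.List.sorted s2.toList (fun c => c) false :=
        fun h => hp ((PySem.List.sorted_id_eq_sorted_id_iff_perm _ _).mp h)
      have hA : areAlmostEqual s1 s2 = false := by
        simp only [areAlmostEqual]
        rw [if_neg (by simpa using hneq), if_pos hsne]
      rw [hA]
      by_cases hlen : s1.toList.length = s2.toList.length
      · rw [pvAltB_cases s1 s2 hlen]
        rcases hd : pvDiffsB s1.toList s2.toList with _ | ⟨⟨a, b⟩, _ | ⟨⟨c, e⟩, _ | ⟨p, t⟩⟩⟩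
        · exact absurd (show s1.toList.Perm s2.toList by
            rw [(pvDiffsB_nil_iff _ _ hlen).mp hd]) hp
        · rfl
        · have hmatch : ¬(a = e ∧ b = c) := by
            rintro ⟨rfl, rfl⟩
            apply hp
            have happ := pvDiffsB_append_perm s1.toList s2.toList hlen
            rw [hd] at happ
            simp only [List.map_cons, List.map_nil] at happ
            have h2 : (s2.toList ++ [a, b]).Perm (s2.toList ++ [b, a]) :=
              ((List.Perm.swap a b []).symm).append_left s2.toList
            exact (List.perm_append_right_iff [b, a]).mp (happ.trans h2)
          show false = (a == e && b == c)
          cases hb : (a == e && b == c)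
          · rfl
          · exact absurd (by simpa using hb) hmatch
        · rfl
      · simp only [areAlmostEqual_alt]
        rw [if_pos hlen]

theorem areAlmostEqual_changed : Claim_changed_areAlmostEqual := by
  unfold Claim_changed_areAlmostEqual; decide

theorem areAlmostEqual_tight : Claim_exact_areAlmostEqual := by
  intro s1 s2 _ hD
  obtain ⟨h2, hrev, hneq⟩ := hD
  obtain ⟨a, b, hab⟩ := List.length_eq_two.mp h2
  have hab' : a ≠ b := by
    rintro rfl
    apply hneq
    apply String.toList_inj.mp
    rw [hrev, hab]
    rfl
  have hl2 : s2.toList = [b, a] := by rw [hrev, hab]; rfl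
  have hperm : s1.toList.Perm s2.toList := by
    rw [hab, hl2]
    exact List.Perm.swap b a []
  have hsorted : PySem.List.sorted s1.toList (fun c => c) false
      = PySem.List.sorted s2.toList (fun c => c) false :=
    PySem.List.sorted_eq_sorted_of_perm _ _ _ (fun _ _ h => h) hperm
  have hA : areAlmostEqual s1 s2 = false := by
    simp only [areAlmostEqual]
    rw [if_neg (by simpa using hneq), if_neg (by simp [hsorted])]
    rw [if_pos (by simp [hneq]; simpa using h2)]
  have hdiffs : pvDiffsB s1.toList s2.toList = [(a, b), (b, a)] := by
    rw [hab, hl2]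
    simp [pvDiffsB, hab', Ne.symm hab']
  have hB : areAlmostEqual_alt s1 s2 = true := by
    rw [pvAltB_cases s1 s2 (by simp [hab, hl2]), hdiffs]
    simp
  rw [hA, hB]
  simp
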